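-- pv_equiv track=rewrite | github.com/Lauriy/advent-of-code-2025 | src/day_6.py | group_problem_columns
-- ===== SOURCE A (Python) =====
-- def group_problem_columns(is_separator: list[bool]) -> list[list[int]]:
--     """Group consecutive non-separator columns into problems."""
--     problems = []
--     current_problem_cols = []
--
--     for col_idx, is_sep in enumerate(is_separator):
--         if not is_sep:
--             current_problem_cols.append(col_idx)
--         elif current_problem_cols:
--             problems.append(current_problem_cols)
--             current_problem_cols = []
--
--     if current_problem_cols:
--         problems.append(current_problem_cols)
--
--     return problems
-- ===== SOURCE B (Python) =====
-- from itertools import groupby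
--
--
-- def group_problem_columns(is_separator: list[bool]) -> list[list[int]]:
--     """Group consecutive non-separator columns into problems (run-by-run via groupby)."""
--     problems = []
--     offset = 0
--     for is_sep, group in groupby(is_separator):
--         length = sum(1 for _ in group)
--         if not is_sep:
--             problems.append(list(range(offset, offset + length)))
--         offset += length
--     return problems
-- ===== Notes on version B (the rewrite author's own statement) =====
-- stated objective: idiomatic
-- what changed: Iterates run-by-run with itertools.groupby, emitting each non-separator run as list(range(offset, offset+length)), instead of element-by-element accumulation with an explicit current buffer and post-loop flush.
import Mathlib
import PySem

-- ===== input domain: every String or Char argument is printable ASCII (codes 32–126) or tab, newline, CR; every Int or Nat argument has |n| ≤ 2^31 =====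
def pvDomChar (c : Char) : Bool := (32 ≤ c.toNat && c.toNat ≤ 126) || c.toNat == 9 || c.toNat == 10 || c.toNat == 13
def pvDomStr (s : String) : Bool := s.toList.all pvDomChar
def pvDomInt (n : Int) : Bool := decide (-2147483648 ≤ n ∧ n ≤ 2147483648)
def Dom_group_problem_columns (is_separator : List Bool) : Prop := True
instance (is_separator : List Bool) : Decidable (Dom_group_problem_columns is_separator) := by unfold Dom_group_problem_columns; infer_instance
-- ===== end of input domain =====

-- B iterates run-by-run (groupby) instead of A's element-by-element buffer; return values proved equal.

-- ===== PORT A =====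
-- A's loop over enumerate(is_separator) with state (problems, current_problem_cols), plus the post-loop flush.
def pvAGo (xs : List Bool) (idx : Int) (problems : List (List Int)) (cur : List Int) : List (List Int) :=
  match xs with
  | [] => if cur = [] then problems else problems ++ [cur]
  | b :: rest =>
    if !b then pvAGo rest (idx + 1) problems (cur ++ [idx])
    else if cur ≠ [] then pvAGo rest (idx + 1) (problems ++ [cur]) []
    else pvAGo rest (idx + 1) problems cur

def group_problem_columns (is_separator : List Bool) : List (List Int) :=
  pvAGo is_separator 0 [] []

-- ===== PORT B =====
-- B's groupby loop: peel one maximal run per step (takeWhile/dropWhile = one groupby group),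
-- emit list(range(offset, offset+length)) for non-separator runs, advance offset by the run length.
def pvBGo (xs : List Bool) (off : Int) : List (List Int) :=
  match xs with
  | [] => []
  | b :: rest =>
    let len : Int := 1 + (rest.takeWhile (fun x => x == b)).length
    let rest' := rest.dropWhile (fun x => x == b)
    if b then pvBGo rest' (off + len)
    else PySem.List.pyRange off (off + len) 1 :: pvBGo rest' (off + len)
termination_by xs.length
decreasing_by
  all_goals
    simpa using Nat.lt_succ_of_le (List.length_dropWhile_le (fun x => x == b) rest)

def group_problem_columns_alt (is_separator : List Bool) : List (List Int) :=
  pvBGo is_separator 0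

-- ===== PRECONDITION & SPEC =====
def Spec_group_problem_columns (is_separator : List Bool) (out : List (List Int)) : Prop := out = group_problem_columns_alt is_separator
instance (is_separator : List Bool) (out : List (List Int)) : Decidable (Spec_group_problem_columns is_separator out) := by unfold Spec_group_problem_columns; infer_instance

-- ===== CLAIM (what is proved, stated in full; the proofs are below) =====
def Claim_equal_group_problem_columns : Prop := ∀ (is_separator : List Bool), Dom_group_problem_columns is_separator → Spec_group_problem_columns is_separator (group_problem_columns is_separator)

-- ===== LEMMAS AND PROOFS =====

-- glue cur rs: merge A's pending buffer `cur` into the first run of rs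
def pvGlue (cur : List Int) : List (List Int) → List (List Int)
  | [] => [cur]
  | r :: rs => (cur ++ r) :: rs

def pvHeadFalse : List Bool → Bool
  | false :: _ => true
  | _ => false

lemma pvHeadFalse_nil : pvHeadFalse [] = false := rfl
lemma pvHeadFalse_true (r : List Bool) : pvHeadFalse (true :: r) = false := rfl
lemma pvHeadFalse_false (r : List Bool) : pvHeadFalse (false :: r) = true := rfl

lemma pvBGo_true (xs : List Bool) (off : Int) :
    pvBGo (true :: xs) off = pvBGo xs (off + 1) := by
  cases xs with
  | nil => simp [pvBGo]
  | cons c r =>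
    cases c with
    | true =>
      rw [pvBGo, pvBGo]
      simp only [List.takeWhile_cons, List.dropWhile_cons]
      norm_num
      ring_nf
    | false =>
      rw [pvBGo]
      simp only [List.takeWhile_cons, List.dropWhile_cons]
      norm_num

lemma pvBGo_false (xs : List Bool) (off : Int) :
    pvBGo (false :: xs) off =
      if pvHeadFalse xs then pvGlue [off] (pvBGo xs (off + 1))
      else [off] :: pvBGo xs (off + 1) := by
  cases xs with
  | nil =>
    simp [pvBGo, pvHeadFalse, PySem.List.pyRange_one_singleton]
  | cons c r =>
    cases c with
    | true =>
      rw [pvBGo]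
      simp only [List.takeWhile_cons, List.dropWhile_cons, pvHeadFalse_true]
      norm_num [PySem.List.pyRange_one_singleton]
    | false =>
      rw [pvBGo, pvBGo]
      simp only [List.takeWhile_cons, List.dropWhile_cons, pvHeadFalse_false]
      norm_num [pvGlue]
      rw [PySem.List.pyRange_one_cons (by
        have : (0:Int) ≤ (r.takeWhile (fun x => x == false)).length := by positivity
        omega)]
      ring_nf
      exact ⟨trivial, trivial⟩

lemma pvBGo_false_ne_nil (xs : List Bool) (off : Int) (h : pvHeadFalse xs = true) :
    pvBGo xs off ≠ [] := by
  cases xs with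
  | nil => simp [pvHeadFalse] at h
  | cons c r =>
    cases c with
    | true => simp [pvHeadFalse] at h
    | false =>
      rw [pvBGo_false]
      split
      · cases pvBGo r (off + 1) <;> simp [pvGlue]
      · simp

lemma pvBGo_cons_exists (xs : List Bool) (off : Int) (h : pvHeadFalse xs = true) :
    ∃ r rs, pvBGo xs off = r :: rs := by
  cases hbe : pvBGo xs off with
  | nil => exact absurd hbe (pvBGo_false_ne_nil xs off h)
  | cons r rs => exact ⟨r, rs, rfl⟩

lemma pvMain (xs : List Bool) : ∀ (off : Int) (problems : List (List Int)) (cur : List Int),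
    pvAGo xs off problems cur =
      problems ++ (if pvHeadFalse xs then pvGlue cur (pvBGo xs off)
                   else (if cur = [] then [] else [cur]) ++ pvBGo xs off) := by
  induction xs with
  | nil => intro off problems cur; simp [pvAGo, pvBGo, pvHeadFalse_nil]; split <;> simp
  | cons b rest ih =>
    intro off problems cur
    cases b with
    | false =>
      rw [pvAGo, if_pos (by simp), ih, pvHeadFalse_false, if_pos rfl, pvBGo_false]
      cases hh : pvHeadFalse rest with
      | true =>
        obtain ⟨r, rs, hr⟩ := pvBGo_cons_exists rest (off + 1) hh
        simp [hr, pvGlue]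
      | false =>
        simp [pvGlue]
    | true =>
      rw [pvAGo, if_neg (by simp), pvHeadFalse_true, pvBGo_true]
      simp only [Bool.false_eq_true, if_false]
      by_cases hc : cur = []
      · subst hc
        rw [if_neg (by simp), ih]
        cases hh : pvHeadFalse rest with
        | true =>
          obtain ⟨r, rs, hr⟩ := pvBGo_cons_exists rest (off + 1) hh
          simp [hr, pvGlue]
        | false => simp
      · rw [if_pos hc, ih, if_neg hc]
        cases hh : pvHeadFalse rest with
        | true =>
          obtain ⟨r, rs, hr⟩ := pvBGo_cons_exists rest (off + 1) hh
          simp [hr, pvGlue]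
        | false => simp

-- ===== VERDICT (by name: the statement is the Claim_ definition above) =====
theorem group_problem_columns_spec : Claim_equal_group_problem_columns := by
  intro xs _
  unfold Spec_group_problem_columns group_problem_columns group_problem_columns_alt
  rw [pvMain]
  cases hh : pvHeadFalse xs with
  | true =>
    obtain ⟨r, rs, hr⟩ := pvBGo_cons_exists xs 0 hh
    simp [hr, pvGlue]
  | false => simp
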